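-- pv_equiv track=rewrite | github.com/Song-Hyunsub/Univ_Study | CodingExercise/PythonBasic/프로그래머스/기초트레이닝Day20-3.py | solution
-- ===== SOURCE A (Python) =====
-- def solution(strArr):
--     length_count = {}
--
--     for s in strArr:
--         length = len(s)
--         if length in length_count:
--             length_count[length] += 1
--         else:
--             length_count[length] = 1
--
--     # 가장 큰 그룹의 크기를 반환
--     return max(length_count.values())
-- ===== SOURCE B (Python) =====
-- def solution(strArr):
--     best = 0
--     run = 0
--     prev = None
--     for L in sorted(len(s) for s in strArr):
--         if L == prev:
--             run += 1
--         else: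
--             run = 1
--             prev = L
--         if run > best:
--             best = run
--     return best
-- ===== Notes on version B (the rewrite author's own statement) =====
-- stated objective: alternative
-- what changed: Instead of building a length->count dict and taking max of its values, B sorts the lengths and scans once, tracking the current run of equal consecutive lengths and the best run seen.
import Mathlib
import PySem

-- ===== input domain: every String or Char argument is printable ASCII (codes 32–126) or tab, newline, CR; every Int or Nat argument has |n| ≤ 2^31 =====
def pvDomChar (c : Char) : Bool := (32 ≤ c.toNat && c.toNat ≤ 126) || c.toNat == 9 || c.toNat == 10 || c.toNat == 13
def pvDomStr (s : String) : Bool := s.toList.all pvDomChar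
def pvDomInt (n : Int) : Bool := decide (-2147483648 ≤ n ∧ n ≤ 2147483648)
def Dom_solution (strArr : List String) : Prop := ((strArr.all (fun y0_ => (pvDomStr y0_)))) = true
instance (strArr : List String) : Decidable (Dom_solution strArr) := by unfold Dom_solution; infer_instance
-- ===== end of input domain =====

-- B replaces A's length->count dict with sort-then-scan over runs of equal lengths; objective: alternative (same task, different algorithm).


-- ===== PORT A =====
def solution (strArr : List String) : Int :=
  let length_count : PySem.Dict Int Int :=
    strArr.foldl (fun d s =>
      let length : Int := PySem.Str.len s
      if d.contains length then d.insert length (d.getD length 0 + 1)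
      else d.insert length 1) PySem.Dict.empty
  (PySem.List.max? length_count.values (fun x => x)).getD 0

-- ===== PORT B =====
-- one iteration of Source B's loop body over the state (best, run, prev)
def pvStepB (st : Int × Int × Option Int) (L : Int) : Int × Int × Option Int :=
  let best := st.1
  let rp := if st.2.2 == some L then (st.2.1 + 1, st.2.2) else ((1 : Int), some L)
  ((if rp.1 > best then rp.1 else best), rp.1, rp.2)

def solution_alt (strArr : List String) : Int :=
  ((PySem.List.sorted (strArr.map (fun s => PySem.Str.len s)) (fun x => x) false).foldl
    pvStepB (0, 0, none)).1

-- ===== PRECONDITION & SPEC =====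
-- Pre_ excludes only the empty list, on which Python's max() over the empty dict's values raises ValueError in A.
def Pre_solution (strArr : List String) : Prop := strArr ≠ []
instance (strArr : List String) : Decidable (Pre_solution strArr) := by unfold Pre_solution; infer_instance
def pvWitness_solution : List String := (["a", "bc", "d"])

def Spec_solution (strArr : List String) (out : Int) : Prop := out = solution_alt strArr
instance (strArr : List String) (out : Int) : Decidable (Spec_solution strArr out) := by unfold Spec_solution; infer_instance

-- ===== CLAIM (what is proved, stated in full; the proofs are below) =====
def Claim_equal_solution : Prop := ∀ (strArr : List String), Dom_solution strArr → Pre_solution strArr → Spec_solution strArr (solution strArr)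

-- ===== LEMMAS AND PROOFS =====

-- count of L in ls, as an Int
def pvCnt (ls : List Int) (L : Int) : Int := (ls.count L : Int)

-- max of a list of Ints with base 0 (the value of "max of the counts")
def pvFmax (c : List Int) : Int := c.foldr max 0

lemma pvCnt_nonneg (ls : List Int) (L : Int) : 0 ≤ pvCnt ls L := by
  simp [pvCnt]

lemma pvFmax_nonneg (c : List Int) : 0 ≤ pvFmax c := by
  induction c with
  | nil => simp [pvFmax]
  | cons h t ih => simp [pvFmax] at ih ⊢; omega

lemma le_pvFmax {x : Int} {c : List Int} (hx : x ∈ c) : x ≤ pvFmax c := by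
  induction c with
  | nil => cases hx
  | cons h t ih =>
    rcases List.mem_cons.mp hx with rfl | hm
    · simp [pvFmax]
    · have := ih hm; simp [pvFmax] at this ⊢; omega

lemma pvFmax_le {c : List Int} {m : Int} (hm : 0 ≤ m) (h : ∀ x ∈ c, x ≤ m) :
    pvFmax c ≤ m := by
  induction c with
  | nil => simpa [pvFmax]
  | cons a t ih =>
    have h1 := h a (List.mem_cons_self)
    have h2 := ih (fun x hx => h x (List.mem_cons_of_mem _ hx))
    simp [pvFmax] at h2 ⊢; omega

-- pvFmax of a map of a nonnegative function depends only on membership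
lemma pvFmax_memEq (f : Int → Int) {l1 l2 : List Int}
    (h : ∀ x, x ∈ l1 ↔ x ∈ l2) : pvFmax (l1.map f) = pvFmax (l2.map f) := by
  have key : ∀ (a b : List Int), (∀ x, x ∈ a → x ∈ b) → pvFmax (a.map f) ≤ pvFmax (b.map f) := by
    intro a b hab
    refine pvFmax_le (pvFmax_nonneg _) ?_
    intro x hx
    rcases List.mem_map.mp hx with ⟨y, hy, rfl⟩
    exact le_pvFmax (List.mem_map.mpr ⟨y, hab y hy, rfl⟩)
  exact le_antisymm (key _ _ fun x hx => (h x).mp hx) (key _ _ fun x hx => (h x).mpr hx)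

lemma foldr_max_base {b : Int} (a : List Int) (hb : 0 ≤ b) :
    a.foldr max b = max (pvFmax a) b := by
  induction a with
  | nil => simp [pvFmax]; omega
  | cons h t ih => simp [pvFmax] at ih ⊢; omega

lemma pvFmax_append_singleton (a : List Int) (v : Int) (hv : 0 ≤ v) :
    pvFmax (a ++ [v]) = max (pvFmax a) v := by
  show (a ++ [v]).foldr max 0 = _
  rw [List.foldr_append]
  have : ([v] : List Int).foldr max 0 = max v 0 := rfl
  rw [this, foldr_max_base a (by omega)]
  omega

lemma pvCnt_append_singleton (ys : List Int) (x L : Int) :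
    pvCnt (ys ++ [x]) L = pvCnt ys L + (if L = x then 1 else 0) := by
  simp [pvCnt, List.count_append, List.count_singleton]
  split_ifs with h <;> simp <;> omega

-- bumping f at x by 1 bumps the max accordingly
lemma pvFmax_bump (g : Int → Int) (hg : ∀ y, 0 ≤ g y) (x : Int) (ys : List Int) :
    pvFmax (ys.map (fun L => g L + (if L = x then 1 else 0)))
      = max (pvFmax (ys.map g)) (if x ∈ ys then g x + 1 else 0) := by
  induction ys with
  | nil => simp [pvFmax]
  | cons h t ih =>
    have hF : 0 ≤ pvFmax (t.map g) := pvFmax_nonneg _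
    have hgh := hg h
    have hgx := hg x
    by_cases hhx : h = x
    · subst hhx
      by_cases hxt : h ∈ t <;>
        simp [pvFmax, hxt, List.mem_cons] at ih ⊢ <;> rw [ih] <;> omega
    · by_cases hxt : x ∈ t <;>
        simp [pvFmax, hxt, hhx, Ne.symm hhx, List.mem_cons] at ih ⊢ <;> rw [ih] <;> omega

-- the key step: appending one element to the data updates "max count" by max with (old count + 1)
lemma pvMc_append (ys : List Int) (x : Int) :
    pvFmax ((ys ++ [x]).map (pvCnt (ys ++ [x])))
      = max (pvFmax (ys.map (pvCnt ys))) (pvCnt ys x + 1) := by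
  have hmapeq : (ys ++ [x]).map (pvCnt (ys ++ [x]))
      = ys.map (fun L => pvCnt ys L + (if L = x then 1 else 0)) ++ [pvCnt ys x + 1] := by
    rw [List.map_append]
    congr 1
    · exact List.map_congr_left (fun L _ => pvCnt_append_singleton ys x L)
    · simp [pvCnt_append_singleton]
  rw [hmapeq, pvFmax_append_singleton _ _ (by have := pvCnt_nonneg ys x; omega),
    pvFmax_bump (pvCnt ys) (pvCnt_nonneg ys) x ys]
  have := pvCnt_nonneg ys x
  by_cases hx : x ∈ ys <;> simp [hx] <;> omega

lemma last_is_max {ys : List Int} (hp : List.Pairwise (· ≤ ·) ys) (h : ys ≠ [])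
    {y : Int} (hy : y ∈ ys) : y ≤ ys.getLast h := by
  have hsplit := List.dropLast_append_getLast h
  rw [← hsplit] at hp hy
  rcases List.mem_append.mp hy with hmem | hmem
  · exact ((List.pairwise_append.mp hp).2.2 y hmem _ (List.mem_singleton_self _))
  · simp [List.mem_singleton.mp hmem]

-- the scan over a sorted nonempty list computes (max count, count of last, last)
lemma scan_spec (ys : List Int) (hp : List.Pairwise (· ≤ ·) ys) (h : ys ≠ []) :
    ys.foldl pvStepB (0, 0, none)
      = (pvFmax (ys.map (pvCnt ys)), pvCnt ys (ys.getLast h), some (ys.getLast h)) := by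
  induction ys using List.reverseRecOn with
  | nil => exact absurd rfl h
  | append_singleton ys x ih =>
    rcases List.pairwise_append.mp hp with ⟨hpy, _, hle⟩
    by_cases hnil : ys = []
    · subst hnil
      simp [pvStepB, pvFmax, pvCnt]
    · have hlast : (ys ++ [x]).getLast h = x := by
        simp
      rw [List.foldl_append, ih hpy hnil, hlast]
      set l := ys.getLast hnil with hl
      have hlm : l ∈ ys := List.getLast_mem hnil
      by_cases hlx : l = x
      · subst hlx
        have hrun : pvCnt (ys ++ [l]) l = pvCnt ys l + 1 := by
          rw [pvCnt_append_singleton]; simp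
        rw [pvMc_append]
        simp only [pvStepB, List.foldl, hrun]
        have hM := pvFmax_nonneg (ys.map (pvCnt ys))
        have hc := pvCnt_nonneg ys l
        have hclF : pvCnt ys l ≤ pvFmax (ys.map (pvCnt ys)) :=
          le_pvFmax (List.mem_map.mpr ⟨l, hlm, rfl⟩)
        split_ifs with hgt <;> simp_all <;> omega
      · have hxnot : x ∉ ys := by
          intro hxm
          have h1 : l ≤ x := hle l hlm x (List.mem_singleton_self _)
          have h2 : x ≤ l := last_is_max hpy hnil hxm
          exact hlx (le_antisymm h1 h2)
        have hc0 : pvCnt ys x = 0 := by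
          simp [pvCnt, List.count_eq_zero_of_not_mem hxnot]
        have hrun : pvCnt (ys ++ [x]) x = 1 := by
          rw [pvCnt_append_singleton]; simp [hc0]
        rw [pvMc_append, hc0]
        simp only [pvStepB, List.foldl]
        have hlxne : (some l == some x) = false := by
          simp [hlx]
        have hM := pvFmax_nonneg (ys.map (pvCnt ys))
        have hclF : pvCnt ys l ≤ pvFmax (ys.map (pvCnt ys)) :=
          le_pvFmax (List.mem_map.mpr ⟨l, hlm, rfl⟩)
        have hcl := pvCnt_nonneg ys l
        rw [hlxne, hrun]
        split_ifs <;> simp_all <;> omega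

-- ===== A-side lemmas (dict fold = counter, values = counts over the ordered set) =====

lemma step_eq_counter_step (d : PySem.Dict Int Int) (x : Int) :
    (if d.contains x then d.insert x (d.getD x 0 + 1) else d.insert x 1)
      = d.insert x (d.getD x 0 + 1) := by
  by_cases h : d.contains x = true
  · simp [h]
  · have h' : d.get? x = none := by
      rcases hg : d.get? x with _ | v
      · rfl
      · exact absurd (by rw [PySem.Dict.contains_eq_isSome_get?, hg]; rfl) h
    simp [h, PySem.Dict.getD, h']

lemma values_fold_eq (strArr : List String) :
    (strArr.foldl (fun d s =>
        let length : Int := PySem.Str.len s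
        if d.contains length then d.insert length (d.getD length 0 + 1)
        else d.insert length 1) (PySem.Dict.empty : PySem.Dict Int Int)).values
      = (PySem.Set.ofList (strArr.map (fun s => PySem.Str.len s))).map
          (fun L => ((strArr.map (fun s => PySem.Str.len s)).count L : Int)) := by
  have hfold :
      strArr.foldl (fun d s =>
        let length : Int := PySem.Str.len s
        if d.contains length then d.insert length (d.getD length 0 + 1)
        else d.insert length 1) (PySem.Dict.empty : PySem.Dict Int Int)
      = PySem.Dict.counter (strArr.map (fun s => PySem.Str.len s)) := by
    rw [← PySem.Dict.foldl_insert_getD_add_one_eq_counter, List.foldl_map]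
    congr 1
    funext d s
    exact step_eq_counter_step d (PySem.Str.len s)
  rw [hfold]
  show (PySem.Dict.counter (strArr.map fun s => PySem.Str.len s)).items.map Prod.snd = _
  rw [PySem.Dict.items_counter, List.map_map]
  rfl

-- ===== VERDICT (by name: the statement is the Claim_ definition above) =====
theorem solution_spec : Claim_equal_solution := by
  intro strArr _ hpre
  show solution strArr = solution_alt strArr
  set ls := strArr.map (fun s => PySem.Str.len s) with hls
  have hlsne : ls ≠ [] := by
    simp [hls, List.map_eq_nil_iff]; exact hpre
  -- B's value
  set ys := PySem.List.sorted ls (fun x => x) false with hys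
  have hperm : ys.Perm ls := PySem.List.sorted_perm ls (fun x => x) false
  have hysne : ys ≠ [] := by
    intro h0
    have hp2 : ls.Perm [] := h0 ▸ hperm.symm
    exact hlsne hp2.eq_nil
  have hpw : List.Pairwise (· ≤ ·) ys := by
    simpa using PySem.List.sorted_pairwise ls (fun x => x)
  have hB : solution_alt strArr = pvFmax (ys.map (pvCnt ys)) := by
    show ((ys.foldl pvStepB (0, 0, none)).1 = _)
    rw [scan_spec ys hpw hysne]
  -- counts in ys = counts in ls
  have hcnt : pvCnt ys = pvCnt ls := by
    funext L; simp [pvCnt, hperm.count_eq]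
  -- A's value
  have hV : solution strArr
      = (PySem.List.max? ((PySem.Set.ofList ls).map (pvCnt ls)) (fun x => x)).getD 0 := by
    show (PySem.List.max? _ (fun x => x)).getD 0 = _
    rw [values_fold_eq strArr]
    rfl
  have hsetne : (PySem.Set.ofList ls) ≠ [] := by
    rcases List.exists_cons_of_ne_nil hlsne with ⟨a, t, hat⟩
    intro h0
    have : a ∈ PySem.Set.ofList ls := (PySem.Set.mem_ofList ls a).mpr (by simp [hat])
    simp [h0] at this
  have hmapne : (PySem.Set.ofList ls).map (pvCnt ls) ≠ [] := by
    simp only [ne_eq, List.map_eq_nil_iff]; exact hsetne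
  rcases List.exists_cons_of_ne_nil hmapne with ⟨v, t, hvt⟩
  have hmax : PySem.List.max? ((PySem.Set.ofList ls).map (pvCnt ls)) (fun x => x)
      = some (t.foldl max v) := by
    rw [hvt]; exact PySem.List.max?_id_cons v t
  have hmmem : t.foldl max v ∈ (PySem.Set.ofList ls).map (pvCnt ls) := PySem.List.max?_mem hmax
  have hmmax : ∀ y ∈ (PySem.Set.ofList ls).map (pvCnt ls), y ≤ t.foldl max v := by
    intro y hy
    exact PySem.List.max?_isMax hmax y hy
  have hm0 : 0 ≤ t.foldl max v := by
    rcases List.mem_map.mp hmmem with ⟨L, _, hLm⟩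
    rw [← hLm]; exact pvCnt_nonneg ls L
  have hA : solution strArr = pvFmax ((PySem.Set.ofList ls).map (pvCnt ls)) := by
    rw [hV, hmax, Option.getD_some]
    exact le_antisymm (le_pvFmax hmmem) (pvFmax_le hm0 hmmax)
  rw [hA, hB, hcnt]
  exact (pvFmax_memEq (pvCnt ls) (fun x => by
    rw [hperm.mem_iff, ← PySem.Set.mem_ofList ls x])).symm
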